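-- pv_equiv track=rewrite | github.com/michael-horansky/coherent-states | code snippets/extended_cauchy_binet.py | recast_choice
-- ===== SOURCE A (Python) =====
-- def recast_choice(choice, excluded_indices, include_excluded_indices = False):
--     recasted = []
--     reduced_index = 0
--     for i in range(max(max(choice) + len(excluded_indices) + 1, max(excluded_indices) + len(choice) + 1)):
--         if i not in excluded_indices:
--             if reduced_index in choice:
--                 recasted.append(i)
--             reduced_index += 1
--         elif include_excluded_indices:
--             recasted.append(i)
--     return(recasted)
-- ===== SOURCE B (Python) =====
-- def recast_choice(choice, excluded_indices, include_excluded_indices = False):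
--     # Map each chosen reduced index directly to its full index by stepping over
--     # the sorted excluded indices; negative entries are not valid positions and
--     # are ignored.
--     excluded = sorted({e for e in excluded_indices if e >= 0})
--     recasted = list(excluded) if include_excluded_indices else []
--     for r in {c for c in choice if c >= 0}:
--         full = r
--         for e in excluded:
--             if e <= full:
--                 full += 1
--             else:
--                 break
--         recasted.append(full)
--     return sorted(recasted)
-- ===== Notes on version B (the rewrite author's own statement) =====
-- stated objective: faster
-- what changed: Instead of scanning every integer i up to a bound that grows with the maximum value in the lists and testing list membership at each step, B maps each distinct chosen reduced index directly to its full index by walking the sorted deduplicated excluded indices, so the cost depends only on the list lengths, not on the magnitude of the values; Pre_ excludes only the inputs where A raises ValueError (max() of an empty list).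
import Mathlib
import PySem

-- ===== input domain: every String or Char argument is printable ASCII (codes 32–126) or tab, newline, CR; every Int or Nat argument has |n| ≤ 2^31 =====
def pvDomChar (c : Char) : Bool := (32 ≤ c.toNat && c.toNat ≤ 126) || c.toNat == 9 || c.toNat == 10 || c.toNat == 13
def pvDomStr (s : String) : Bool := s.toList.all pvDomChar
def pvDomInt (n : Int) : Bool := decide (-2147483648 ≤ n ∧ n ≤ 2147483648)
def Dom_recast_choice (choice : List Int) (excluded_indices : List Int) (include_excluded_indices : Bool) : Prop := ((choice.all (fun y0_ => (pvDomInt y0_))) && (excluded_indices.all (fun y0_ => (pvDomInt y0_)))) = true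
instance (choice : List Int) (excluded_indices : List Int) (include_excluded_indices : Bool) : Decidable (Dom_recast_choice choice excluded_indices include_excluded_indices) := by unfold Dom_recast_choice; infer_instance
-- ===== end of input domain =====

-- B maps each chosen reduced index directly to its full index via the sorted excluded
-- indices instead of scanning every integer up to the maximum value (objective: faster).

-- ===== PORT A =====
def recast_choice (choice : List Int) (excluded_indices : List Int) (include_excluded_indices : Bool) : List Int :=
  match PySem.List.max? choice (fun x => x), PySem.List.max? excluded_indices (fun x => x) with
  | some mc, some me =>
      ((PySem.List.pyRange 0 (max (mc + excluded_indices.length + 1) (me + choice.length + 1)) 1).foldl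
        (fun (s : List Int × Int) i =>
          if i ∉ excluded_indices then
            ((if s.2 ∈ choice then s.1 ++ [i] else s.1), s.2 + 1)
          else if include_excluded_indices then (s.1 ++ [i], s.2)
          else s)
        ([], 0)).1
  | _, _ => []  -- Python raises ValueError (max of empty list); excluded by Pre_

-- ===== PORT B =====
-- inner 'for e in excluded: if e <= full: full += 1 else: break'
def pvWalk (exc : List Int) (m : Int) : Int :=
  match exc with
  | [] => m
  | e :: t => if e ≤ m then pvWalk t (m + 1) else m

def recast_choice_alt (choice : List Int) (excluded_indices : List Int) (include_excluded_indices : Bool) : List Int :=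
  let excluded : List Int :=
    PySem.List.sorted (PySem.Set.ofList (excluded_indices.filter (fun e => decide (0 ≤ e)))) (fun x => x) false
  let recasted0 : List Int := if include_excluded_indices then excluded else []
  let recasted : List Int :=
    (PySem.Set.ofList (choice.filter (fun c => decide (0 ≤ c)))).foldl
      (fun acc r => acc ++ [pvWalk excluded r]) recasted0
  PySem.List.sorted recasted (fun x => x) false

-- ===== PRECONDITION & SPEC =====
-- Pre_ excludes exactly the inputs where Python A raises ValueError: max() of an empty list.
def Pre_recast_choice (choice : List Int) (excluded_indices : List Int) (include_excluded_indices : Bool) : Prop :=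
  choice ≠ [] ∧ excluded_indices ≠ []
instance (choice : List Int) (excluded_indices : List Int) (include_excluded_indices : Bool) : Decidable (Pre_recast_choice choice excluded_indices include_excluded_indices) := by unfold Pre_recast_choice; infer_instance

def pvWitness_recast_choice : List Int × List Int × Bool := ([0, 2], [1, 3], false)


def Spec_recast_choice (choice : List Int) (excluded_indices : List Int) (include_excluded_indices : Bool) (out : List Int) : Prop := out = recast_choice_alt choice excluded_indices include_excluded_indices
instance (choice : List Int) (excluded_indices : List Int) (include_excluded_indices : Bool) (out : List Int) : Decidable (Spec_recast_choice choice excluded_indices include_excluded_indices out) := by unfold Spec_recast_choice; infer_instance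

-- ===== CLAIM (what is proved, stated in full; the proofs are below) =====
def Claim_equal_recast_choice : Prop := ∀ (choice : List Int) (excluded_indices : List Int) (include_excluded_indices : Bool), Dom_recast_choice choice excluded_indices include_excluded_indices → Pre_recast_choice choice excluded_indices include_excluded_indices → Spec_recast_choice choice excluded_indices include_excluded_indices (recast_choice choice excluded_indices include_excluded_indices)

-- ===== LEMMAS AND PROOFS =====

-- number of j ∈ [0, n) with (j : Int) ∉ E   (A's reduced_index after n loop steps)
def pvCnt (E : List Int) : Nat → Nat
  | 0 => 0
  | n + 1 => pvCnt E n + (if (n : Int) ∈ E then 0 else 1)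

-- whether A appends index k
def pvP (c e : List Int) (flag : Bool) (k : Nat) : Bool :=
  if (k : Int) ∈ e then flag else decide (((pvCnt e k : Nat) : Int) ∈ c)

-- A's output after scanning [0, n)
def pvOutA (c e : List Int) (flag : Bool) (n : Nat) : List Int :=
  ((List.range n).filter (pvP c e flag)).map Int.ofNat

theorem pvCnt_nil (n : Nat) : pvCnt [] n = n := by
  induction n with
  | zero => rfl
  | succ n ih => simp [pvCnt, ih]

theorem pvCnt_succ_ge (E : List Int) (n : Nat) : pvCnt E n ≤ pvCnt E (n + 1) := by
  simp only [pvCnt]; split <;> omega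

theorem pvCnt_mono (E : List Int) {n m : Nat} (h : n ≤ m) : pvCnt E n ≤ pvCnt E m := by
  induction m with
  | zero => have : n = 0 := by omega
            simp [this]
  | succ m ih =>
    rcases Nat.lt_succ_iff_lt_or_eq.mp (Nat.lt_succ_of_le h) with h' | h'
    · exact le_trans (ih (by omega)) (pvCnt_succ_ge E m)
    · simp [h']

theorem pvCnt_succ_of_not_mem (E : List Int) {n : Nat} (h : (n : Int) ∉ E) :
    pvCnt E (n + 1) = pvCnt E n + 1 := by
  simp [pvCnt, h]

theorem pvCnt_inj (E : List Int) {x y : Nat} (hx : (x : Int) ∉ E) (hy : (y : Int) ∉ E)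
    (h : pvCnt E x = pvCnt E y) : x = y := by
  rcases Nat.lt_trichotomy x y with hlt | he | hlt
  · have h1 := pvCnt_succ_of_not_mem E hx
    have h2 := pvCnt_mono E (show x + 1 ≤ y by omega)
    omega
  · exact he
  · have h1 := pvCnt_succ_of_not_mem E hy
    have h2 := pvCnt_mono E (show y + 1 ≤ x by omega)
    omega

theorem pvCnt_cons {e : Int} {t : List Int} (he0 : 0 ≤ e) (he : e ∉ t) (n : Nat) :
    pvCnt (e :: t) n + (if e < (n : Int) then 1 else 0) = pvCnt t n := by
  induction n with
  | zero =>
    simp only [pvCnt, Nat.cast_zero]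
    split <;> omega
  | succ n ih =>
    by_cases hne : (n : Int) = e
    · subst hne
      have h1 : ¬ (((n : Nat) : Int) < ((n : Nat) : Int)) := lt_irrefl _
      have h2 : ((n : Nat) : Int) < (((n + 1 : Nat)) : Int) := by push_cast; omega
      simp only [pvCnt, List.mem_cons, true_or, if_true]
      rw [if_pos h2]
      rw [if_neg h1] at ih
      rw [if_neg he]
      omega
    · have hmem : ((n : Int) ∈ e :: t) = ((n : Int) ∈ t) := by
        simp [List.mem_cons, hne]
      have hif : (e < ((n + 1 : Nat) : Int)) ↔ (e < (n : Int)) := by push_cast; omega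
      simp only [pvCnt, hmem]
      by_cases hlt : e < (n : Int)
      · rw [if_pos (hif.mpr hlt)]
        rw [if_pos hlt] at ih
        split <;> omega
      · rw [if_neg (fun h => hlt (hif.mp h))]
        rw [if_neg hlt] at ih
        split <;> omega

theorem pvCnt_eq_self {E : List Int} {n : Nat} (h : ∀ x ∈ E, (n : Int) ≤ x) : pvCnt E n = n := by
  induction n with
  | zero => rfl
  | succ n ih =>
    have hn : (n : Int) ∉ E := by
      intro hm
      have := h _ hm
      push_cast at this
      omega
    rw [pvCnt_succ_of_not_mem E hn, ih]
    intro x hx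
    have := h x hx
    push_cast at this ⊢
    omega

theorem pvCnt_congr {e E : List Int} (n : Nat)
    (h : ∀ j : Nat, ((j : Int) ∈ e ↔ (j : Int) ∈ E)) : pvCnt e n = pvCnt E n := by
  induction n with
  | zero => rfl
  | succ n ih =>
    have h1 := h n
    simp only [pvCnt, ih]
    by_cases hm : (n : Int) ∈ E
    · simp [hm, h1.mpr hm]
    · have hne : (n : Int) ∉ e := fun hh => hm (h1.mp hh)
      simp [hm, hne]

theorem pvWalk_ge (E : List Int) (m : Int) : m ≤ pvWalk E m := by
  induction E generalizing m with
  | nil => simp [pvWalk]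
  | cons e t ih =>
    simp only [pvWalk]
    split
    · have := ih (m + 1); omega
    · omega

theorem pvWalk_le (E : List Int) (m : Int) : pvWalk E m ≤ m + E.length := by
  induction E generalizing m with
  | nil => simp [pvWalk]
  | cons e t ih =>
    simp only [pvWalk, List.length_cons]
    split
    · have := ih (m + 1); push_cast; omega
    · push_cast; omega

theorem pvWalk_spec {E : List Int} (hs : E.Pairwise (· < ·)) (hpos : ∀ x ∈ E, 0 ≤ x) (r : Nat) :
    pvWalk E (r : Int) ∉ E ∧ pvCnt E (pvWalk E (r : Int)).toNat = r := by
  induction E generalizing r with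
  | nil => simpa [pvWalk, Int.toNat_natCast] using pvCnt_nil r
  | cons e t ih =>
    have hst : t.Pairwise (· < ·) := hs.of_cons
    have hlt : ∀ x ∈ t, e < x := by
      intro x hx; exact List.rel_of_pairwise_cons hs hx
    have hent : e ∉ t := fun hm => absurd (hlt e hm) (lt_irrefl e)
    have hpt : ∀ x ∈ t, 0 ≤ x := fun x hx => hpos x (List.mem_cons_of_mem e hx)
    simp only [pvWalk]
    by_cases hle : e ≤ (r : Int)
    · rw [if_pos hle]
      have hcast : (r : Int) + 1 = ((r + 1 : Nat) : Int) := by push_cast; ring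
      rw [hcast]
      obtain ⟨h1, h2⟩ := ih hst hpt (r + 1)
      set w := pvWalk t ((r + 1 : Nat) : Int) with hw
      have hwge : ((r + 1 : Nat) : Int) ≤ w := pvWalk_ge t _
      have hew : e < w := by push_cast at hwge; omega
      constructor
      · intro hm
        rcases List.mem_cons.mp hm with h | h
        · omega
        · exact h1 h
      · have := pvCnt_cons (hpos e (by simp)) hent w.toNat
        have hwn : e < (w.toNat : Int) := by
          have : 0 ≤ w := by push_cast at hwge; omega
          omega
        rw [if_pos hwn] at this
        omega
    · rw [if_neg hle]
      constructor
      · intro hm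
        rcases List.mem_cons.mp hm with h | h
        · omega
        · have := hlt _ h; omega
      · rw [Int.toNat_natCast]
        exact pvCnt_eq_self (by
          intro x hx
          rcases List.mem_cons.mp hx with h | h
          · omega
          · have := hlt _ h; omega)

-- A's loop, characterized
theorem pvOutA_succ (c e : List Int) (flag : Bool) (n : Nat) :
    pvOutA c e flag (n + 1) =
      pvOutA c e flag n ++ (if pvP c e flag n then [Int.ofNat n] else []) := by
  simp only [pvOutA, List.range_succ, List.filter_append, List.map_append, List.filter_cons]
  by_cases h : pvP c e flag n <;> simp [h]

theorem pvFoldA (c e : List Int) (flag : Bool) (n : Nat) :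
    (((List.range n).map Int.ofNat).foldl
      (fun (s : List Int × Int) i =>
        if i ∉ e then
          ((if s.2 ∈ c then s.1 ++ [i] else s.1), s.2 + 1)
        else if flag then (s.1 ++ [i], s.2)
        else s)
      ([], 0)) = (pvOutA c e flag n, (pvCnt e n : Int)) := by
  induction n with
  | zero => simp [pvOutA, pvCnt]
  | succ n ih =>
    rw [List.range_succ]
    simp only [List.map_append, List.foldl_append, List.map_cons, List.map_nil,
      List.foldl_cons, List.foldl_nil]
    rw [ih]
    by_cases hm : (n : Int) ∈ e
    · by_cases hf : flag
      · simp [pvOutA_succ, pvP, pvCnt, hm, hf]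
      · simp [pvOutA_succ, pvP, pvCnt, hm, hf]
    · by_cases hc : ((pvCnt e n : Nat) : Int) ∈ c
      · simp [pvOutA_succ, pvP, pvCnt, hm, hc]
      · simp [pvOutA_succ, pvP, pvCnt, hm, hc]

theorem pvWalk_spec' {E : List Int} (hs : E.Pairwise (· < ·)) (hpos : ∀ x ∈ E, 0 ≤ x)
    {r : Int} (hr : 0 ≤ r) : pvWalk E r ∉ E ∧ pvCnt E (pvWalk E r).toNat = r.toNat := by
  have h := pvWalk_spec hs hpos r.toNat
  rwa [Int.toNat_of_nonneg hr] at h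

theorem pvMain (c e E R : List Int) (flag : Bool) (n : Int)
    (hEmem : ∀ x : Int, x ∈ E ↔ (x ∈ e ∧ 0 ≤ x))
    (hEs : E.Pairwise (· < ·))
    (hEb : ∀ x ∈ E, x < n)
    (hRmem : ∀ r : Int, r ∈ R ↔ (r ∈ c ∧ 0 ≤ r))
    (hRnodup : R.Nodup)
    (hWb : ∀ r ∈ R, pvWalk E r < n) :
    ((if flag then E else []) ++ R.map (fun r => pvWalk E r)).Perm
      (pvOutA c e flag n.toNat) := by
  have hEpos : ∀ x ∈ E, 0 ≤ x := fun x hx => ((hEmem x).mp hx).2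
  have hEnodup : E.Nodup := hEs.imp (fun h => ne_of_lt h)
  have hcnt : ∀ k : Nat, pvCnt e k = pvCnt E k := by
    intro k
    apply pvCnt_congr
    intro j
    have hj0 : (0 : Int) ≤ (j : Int) := Int.natCast_nonneg j
    rw [hEmem]
    tauto
  have hwalk : ∀ r : Int, 0 ≤ r → pvWalk E r ∉ E ∧ pvCnt E (pvWalk E r).toNat = r.toNat :=
    fun r hr => pvWalk_spec' hEs hEpos hr
  have hOutNodup : (pvOutA c e flag n.toNat).Nodup := by
    apply List.Nodup.map
    · intro a b hab
      exact Int.ofNat_inj.mp hab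
    · exact (List.nodup_range (n := n.toNat)).filter _
  have hmapOn : ∀ x ∈ R, ∀ y ∈ R, pvWalk E x = pvWalk E y → x = y := by
    intro x hx y hy hxy
    have hx0 : 0 ≤ x := ((hRmem x).mp hx).2
    have hy0 : 0 ≤ y := ((hRmem y).mp hy).2
    have h1 := (hwalk x hx0).2
    have h2 := (hwalk y hy0).2
    rw [hxy] at h1
    omega
  have hLnodup : ((if flag then E else []) ++ R.map (fun r => pvWalk E r)).Nodup := by
    apply List.Nodup.append
    · cases flag
      · simp
      · simpa using hEnodup
    · exact List.Nodup.map_on hmapOn hRnodup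
    · intro x hx hx'
      have hxE : x ∈ E := by
        cases flag
        · simp at hx
        · simpa using hx
      obtain ⟨r, hr, hrx⟩ := List.mem_map.mp hx'
      have hr0 : 0 ≤ r := ((hRmem r).mp hr).2
      exact (hwalk r hr0).1 (hrx ▸ hxE)
  refine (List.perm_ext_iff_of_nodup hLnodup hOutNodup).mpr ?_
  intro x
  simp only [List.mem_append, List.mem_map, pvOutA, List.mem_filter, List.mem_range]
  constructor
  · rintro (hx | ⟨r, hrR, rfl⟩)
    · -- x came from the excluded side: flag = true and x ∈ E
      have hflag : flag = true := by
        cases flag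
        · simp at hx
        · rfl
      have hxE : x ∈ E := by
        cases flag
        · simp at hx
        · simpa using hx
      obtain ⟨hxe, hx0⟩ := (hEmem x).mp hxE
      have hxn : x < n := hEb x hxE
      refine ⟨x.toNat, ⟨Int.lt_toNat.mpr (by rwa [Int.toNat_of_nonneg hx0]), ?_⟩, ?_⟩
      · simp only [pvP, Int.toNat_of_nonneg hx0]
        rw [if_pos hxe]
        exact hflag
      · simp [Int.toNat_of_nonneg hx0]
    · -- x = pvWalk E r for a chosen reduced index r
      obtain ⟨hrc, hr0⟩ := (hRmem r).mp hrR
      obtain ⟨hwE, hwcnt⟩ := hwalk r hr0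
      have hw0 : 0 ≤ pvWalk E r := le_trans hr0 (pvWalk_ge E r)
      have hwn : pvWalk E r < n := hWb r hrR
      have hwe : pvWalk E r ∉ e := by
        intro hmem
        exact hwE ((hEmem _).mpr ⟨hmem, hw0⟩)
      refine ⟨(pvWalk E r).toNat,
        ⟨Int.lt_toNat.mpr (by rwa [Int.toNat_of_nonneg hw0]), ?_⟩, ?_⟩
      · simp only [pvP, Int.toNat_of_nonneg hw0]
        rw [if_neg hwe]
        rw [hcnt, hwcnt, Int.toNat_of_nonneg hr0]
        exact decide_eq_true hrc
      · simp [Int.toNat_of_nonneg hw0]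
  · rintro ⟨k, ⟨hk, hP⟩, rfl⟩
    have hkn : (k : Int) < n := Int.lt_toNat.mp hk
    have hk0 : (0 : Int) ≤ (k : Int) := Int.natCast_nonneg k
    by_cases hke : (k : Int) ∈ e
    · left
      have hflag : flag = true := by
        simpa [pvP, hke] using hP
      have : (k : Int) ∈ E := (hEmem _).mpr ⟨hke, hk0⟩
      cases flag
      · exact absurd hflag (by simp)
      · simpa using this
    · right
      have hrc : ((pvCnt e k : Nat) : Int) ∈ c := by
        simpa [pvP, hke] using hP
      set r : Int := ((pvCnt e k : Nat) : Int) with hrdef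
      have hr0 : 0 ≤ r := Int.natCast_nonneg _
      have hrR : r ∈ R := (hRmem r).mpr ⟨hrc, hr0⟩
      obtain ⟨hwE, hwcnt⟩ := hwalk r hr0
      have hw0 : 0 ≤ pvWalk E r := le_trans hr0 (pvWalk_ge E r)
      have hkE : (k : Int) ∉ E := fun h => hke ((hEmem _).mp h).1
      have hcntk : pvCnt E k = r.toNat := by
        rw [← hcnt k]
        simp [hrdef]
      have hwk : (pvWalk E r).toNat = k := by
        apply pvCnt_inj E (x := (pvWalk E r).toNat) (y := k)
        · rwa [Int.toNat_of_nonneg hw0]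
        · exact hkE
        · rw [hwcnt, hcntk]
      have hwk' : pvWalk E r = (k : Int) := by
        rw [← hwk, Int.toNat_of_nonneg hw0]
      exact ⟨r, hrR, by rw [hwk']; simp⟩

-- ===== VERDICT (by name: the statements are the Claim_ definitions above) =====
theorem recast_choice_spec : Claim_equal_recast_choice := by
  intro choice e flag hdom hpre
  obtain ⟨hc, he⟩ := hpre
  unfold Spec_recast_choice
  rcases hmc : PySem.List.max? choice (fun x => x) with _ | mc
  · exact absurd ((PySem.List.max?_eq_none_iff choice (fun x => x)).mp hmc) hc
  rcases hme : PySem.List.max? e (fun x => x) with _ | me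
  · exact absurd ((PySem.List.max?_eq_none_iff e (fun x => x)).mp hme) he
  simp only [recast_choice, recast_choice_alt, hmc, hme]
  set n : Int := max (mc + e.length + 1) (me + choice.length + 1) with hn
  set E : List Int :=
    PySem.List.sorted (PySem.Set.ofList (e.filter (fun v => decide (0 ≤ v)))) (fun x => x) false with hEdef
  set R : List Int := PySem.Set.ofList (choice.filter (fun v => decide (0 ≤ v))) with hRdef
  have hrange : PySem.List.pyRange 0 n 1 = (List.range n.toNat).map Int.ofNat := by
    rw [PySem.List.pyRange_one]
    simp [Int.ofNat_eq_natCast]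
  rw [hrange, pvFoldA, PySem.List.foldl_append_singleton_eq_map]
  have hEmem : ∀ x : Int, x ∈ E ↔ (x ∈ e ∧ 0 ≤ x) := by
    intro x
    rw [hEdef]
    simp [PySem.List.mem_sorted, PySem.Set.mem_ofList, List.mem_filter]
  have hRmem : ∀ r : Int, r ∈ R ↔ (r ∈ choice ∧ 0 ≤ r) := by
    intro r
    rw [hRdef]
    simp [PySem.Set.mem_ofList, List.mem_filter]
  have hEs : E.Pairwise (· < ·) := by
    rw [hEdef]; exact PySem.List.sorted_ofList_pairwise_lt _
  have hRnodup : R.Nodup := by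
    rw [hRdef]; exact PySem.Set.nodup_ofList _
  have hElen : E.length ≤ e.length := by
    have hsub : E ⊆ e := fun x hx => ((hEmem x).mp hx).1
    have hnd : E.Nodup := hEs.imp (fun h => ne_of_lt h)
    exact (hnd.subperm hsub).length_le
  have hEb : ∀ x ∈ E, x < n := by
    intro x hx
    have hxe : x ∈ e := ((hEmem x).mp hx).1
    have hxme : x ≤ me := PySem.List.max?_isMax hme x hxe
    have : (0 : Int) ≤ (choice.length : Int) := Int.natCast_nonneg _
    omega
  have hWb : ∀ r ∈ R, pvWalk E r < n := by
    intro r hr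
    have hrc : r ∈ choice := ((hRmem r).mp hr).1
    have hrmc : r ≤ mc := PySem.List.max?_isMax hmc r hrc
    have h1 := pvWalk_le E r
    have h2 : (E.length : Int) ≤ (e.length : Int) := Int.ofNat_le.mpr hElen
    omega
  have hperm := pvMain choice e E R flag n hEmem hEs hEb hRmem hRnodup hWb
  have hApair : (pvOutA choice e flag n.toNat).Pairwise (fun a b => a < b) := by
    exact List.Pairwise.map _ (fun a b h => Int.ofNat_lt.mpr h)
      ((List.pairwise_lt_range (n := n.toNat)).filter _)
  exact (PySem.List.sorted_eq_of_perm_of_pairwise_lt _ _ (fun x => x) hperm.symm hApair).symm
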